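-- pv_equiv track=rewrite | github.com/Creohex/leetcode | problems/848.py | solve
-- ===== SOURCE A (Python) =====
-- def solve(s: str, shifts: list[int]) -> str:
--     accumulator = 0
--     shifts_moved = []
--     for i in reversed(range(len(shifts))):
--         shifts_moved.insert(0, accumulator + shifts[i])
--         accumulator += shifts[i]
--
--     return "".join(
--         map(
--             lambda v: chr(((v - (123)) % 26) + 97),
--             map(sum, zip(map(ord, s.strip()), shifts_moved)),
--         )
--     )
-- ===== SOURCE B (Python) =====
-- def solve(s: str, shifts: list[int]) -> str:
--     t = s.strip()
--     acc = sum(shifts)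
--     out = []
--     for c, sh in zip(t, shifts):
--         out.append(chr((ord(c) - 97 + acc) % 26 + 97))
--         acc -= sh
--     return "".join(out)
-- ===== Notes on version B (the rewrite author's own statement) =====
-- stated objective: faster
-- what changed: A builds the suffix-shift list with a reversed-index loop doing insert(0, ...) (quadratic) and then maps over a zip; B makes a single forward pass over zip(s.strip(), shifts), carrying the running suffix sum (starting at sum(shifts) and subtracting each shift) and appending each output character.
import Mathlib
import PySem

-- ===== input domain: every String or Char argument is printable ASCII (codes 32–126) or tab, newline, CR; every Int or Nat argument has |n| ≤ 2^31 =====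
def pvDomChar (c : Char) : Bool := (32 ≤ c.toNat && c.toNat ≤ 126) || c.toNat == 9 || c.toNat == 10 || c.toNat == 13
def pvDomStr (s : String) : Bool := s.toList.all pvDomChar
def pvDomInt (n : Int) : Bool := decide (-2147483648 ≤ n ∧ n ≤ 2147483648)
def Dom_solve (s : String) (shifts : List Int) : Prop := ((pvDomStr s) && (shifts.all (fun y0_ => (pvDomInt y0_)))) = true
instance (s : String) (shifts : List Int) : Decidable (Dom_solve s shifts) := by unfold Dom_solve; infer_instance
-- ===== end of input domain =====

-- B replaces A's quadratic reversed-index loop with front inserts by a single forward pass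
-- that carries the running suffix sum (objective: faster, asymptotic).

-- ===== PORT A =====
-- for i in reversed(range(len(shifts))): shifts_moved.insert(0, acc + shifts[i]); acc += shifts[i]
def solveLoopA (shifts : List Int) : Int × List Int :=
  List.foldl
    (fun (st : Int × List Int) (i : Nat) =>
      let v := st.1 + PySem.List.pyGetD shifts (i : Int) 0
      (v, v :: st.2))
    (0, []) (List.range shifts.length).reverse

def solve (s : String) (shifts : List Int) : String :=
  let shifts_moved := (solveLoopA shifts).2
  String.mk
    ((((PySem.Chars.strip s.toList).map (fun c => (c.toNat : Int))).zip shifts_moved).map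
      (fun p => Char.ofNat ((PySem.Int.mod (p.1 + p.2 - 123) 26).toNat + 97)))

-- ===== PORT B =====
-- for c, sh in zip(t, shifts): out.append(chr((ord(c) - 97 + acc) % 26 + 97)); acc -= sh
def solveLoopB : List (Char × Int) → Int → List Char
  | [], _ => []
  | (c, sh) :: rest, acc =>
      Char.ofNat ((PySem.Int.mod ((c.toNat : Int) - 97 + acc) 26).toNat + 97)
        :: solveLoopB rest (acc - sh)

def solve_alt (s : String) (shifts : List Int) : String :=
  let t := PySem.Chars.strip s.toList
  String.mk (solveLoopB (t.zip shifts) shifts.sum)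

-- ===== PRECONDITION & SPEC =====
def Spec_solve (s : String) (shifts : List Int) (out : String) : Prop := out = solve_alt s shifts
instance (s : String) (shifts : List Int) (out : String) : Decidable (Spec_solve s shifts out) := by unfold Spec_solve; infer_instance

-- ===== CLAIM (what is proved, stated in full; the proofs are below) =====
def Claim_equal_solve : Prop := ∀ (s : String) (shifts : List Int), Dom_solve s shifts → Spec_solve s shifts (solve s shifts)

-- ===== LEMMAS AND PROOFS =====

-- suffix sums: sufs l = [sum l[i:] for i in range(len l)]
def sufs : List Int → List Int
  | [] => []
  | x :: r => (x + r.sum) :: sufs r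

lemma map_getD_range (l : List Int) : (List.range l.length).map (fun i => l.getD i 0) = l := by
  apply List.ext_getElem
  · simp
  · intro i h1 h2
    simp [List.getElem?_eq_getElem h2]

lemma foldA_gen (l : List Int) (p : Int × List Int) :
    List.foldl (fun (st : Int × List Int) (x : Int) => (st.1 + x, (st.1 + x) :: st.2)) p l.reverse
      = (p.1 + l.sum, (sufs l).map (fun v => p.1 + v) ++ p.2) := by
  induction l generalizing p with
  | nil => simp [sufs]
  | cons x r ih =>
      simp only [List.reverse_cons, List.foldl_append, List.foldl_cons, List.foldl_nil, ih, sufs,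
        List.sum_cons, List.map_cons]
      have h : p.1 + r.sum + x = p.1 + (x + r.sum) := by ring
      simp [h, List.cons_append]

lemma solveLoopA_rev (shifts : List Int) :
    solveLoopA shifts = (shifts.sum, sufs shifts) := by
  unfold solveLoopA
  have h : shifts.reverse = ((List.range shifts.length).reverse).map (fun i => shifts.getD i 0) := by
    rw [List.map_reverse, map_getD_range]
  have := foldA_gen shifts (0, [])
  rw [h, List.foldl_map] at this
  simpa [PySem.List.pyGetD_natCast] using this

lemma zip_map_eq_loopB (t : List Char) (shifts : List Int) :
    ((t.map (fun c => (c.toNat : Int))).zip (sufs shifts)).map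
        (fun p => Char.ofNat ((PySem.Int.mod (p.1 + p.2 - 123) 26).toNat + 97))
      = solveLoopB (t.zip shifts) shifts.sum := by
  induction t generalizing shifts with
  | nil => simp [solveLoopB]
  | cons c t' ih =>
      cases shifts with
      | nil => simp [sufs, solveLoopB]
      | cons x r =>
          simp only [sufs, List.map_cons, List.zip_cons_cons, solveLoopB, List.sum_cons]
          have hm : PySem.Int.mod ((c.toNat : Int) + (x + r.sum) - 123) 26
              = PySem.Int.mod ((c.toNat : Int) - 97 + (x + r.sum)) 26 := by
            simp only [PySem.Int.mod_eq_emod_of_pos (by norm_num : (0:Int) < 26)]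
            omega
          have hacc : x + r.sum - x = r.sum := by ring
          rw [hm, hacc, ih r]

-- ===== VERDICT (by name: the statement is the Claim_ definition above) =====
theorem solve_spec : Claim_equal_solve := by
  intro s shifts _
  show solve s shifts = solve_alt s shifts
  simp only [solve, solve_alt, solveLoopA_rev, zip_map_eq_loopB]
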